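-- pv_equiv track=rewrite | github.com/joostrijneveld/bitpermutations | examples/squaring_mod_GF2N.py | gen_sequence
-- ===== SOURCE A (Python) =====
-- def gen_sequence(e, N):
--     def interleave(seq):
--         if len(seq) % 2 == 0:
--             return [x for t in zip(seq[:len(seq) // 2],
--                                    seq[len(seq) // 2:]) for x in t]
--         else:
--             return ([x for t in zip(seq[:len(seq) // 2],
--                                     seq[len(seq) // 2 + 1:]) for x in t] +
--                     [seq[len(seq) // 2]])
--     seq = list(range(N))
--     for i in range(e):
--         seq = interleave(seq)
--     return seq
-- ===== SOURCE B (Python) =====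
-- def gen_sequence(e, N):
--     n = N if N > 0 else 0
--     h = n // 2
--     # the one-step interleave permutation p: new[j] = old[p[j]]
--     if n % 2 == 0:
--         p = [j // 2 if j % 2 == 0 else h + j // 2 for j in range(n)]
--     else:
--         p = [j // 2 if j % 2 == 0 else h + 1 + j // 2 for j in range(n - 1)] + [h]
--     res = list(range(n))          # identity permutation = p**0
--     base = p
--     k = e
--     while k > 0:                  # binary exponentiation of the permutation
--         if k % 2 == 1:
--             res = [base[r] for r in res]
--         base = [base[b] for b in base]
--         k //= 2
--     return res
-- ===== Notes on version B (the rewrite author's own statement) =====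
-- stated objective: faster
-- what changed: B builds the one-step interleave position permutation once and raises it to the e-th power by repeated squaring instead of applying the interleave pass e times.
import Mathlib
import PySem

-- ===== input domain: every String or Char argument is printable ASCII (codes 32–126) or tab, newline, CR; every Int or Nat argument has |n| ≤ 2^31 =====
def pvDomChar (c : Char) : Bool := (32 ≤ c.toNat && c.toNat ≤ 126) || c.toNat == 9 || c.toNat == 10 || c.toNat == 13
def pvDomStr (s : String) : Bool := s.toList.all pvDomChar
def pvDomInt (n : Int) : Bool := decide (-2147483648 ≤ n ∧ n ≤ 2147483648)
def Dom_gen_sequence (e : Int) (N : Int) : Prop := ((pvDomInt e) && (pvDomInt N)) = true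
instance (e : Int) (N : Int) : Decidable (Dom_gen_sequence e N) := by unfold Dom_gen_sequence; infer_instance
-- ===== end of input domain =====

-- B replaces A's e-fold interleaving pass by building the one-step position permutation once and
-- raising it to the e-th power by repeated squaring (objective: faster, O(N log e) vs O(e·N)).

-- ===== PORT A =====
-- interleave(seq), transliterated: slices, zip, flatten of pairs, odd middle appended
def pvInterleave (seq : List Int) : List Int :=
  if PySem.Int.mod (seq.length : Int) 2 = 0 then
    ((PySem.List.slice seq none (some (PySem.Int.floordiv (seq.length : Int) 2))).zip
      (PySem.List.slice seq (some (PySem.Int.floordiv (seq.length : Int) 2)) none)).flatMap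
      (fun t => [t.1, t.2])
  else
    ((PySem.List.slice seq none (some (PySem.Int.floordiv (seq.length : Int) 2))).zip
      (PySem.List.slice seq (some (PySem.Int.floordiv (seq.length : Int) 2 + 1)) none)).flatMap
      (fun t => [t.1, t.2])
    ++ [PySem.List.pyGetD seq (PySem.Int.floordiv (seq.length : Int) 2) 0]
    -- seq[len(seq)//2]: the index is in range in this (odd, hence nonempty) branch, so pyGetD is exact

def gen_sequence (e : Int) (N : Int) : List Int :=
  (PySem.List.pyRange 0 e 1).foldl (fun seq _ => pvInterleave seq) (PySem.List.pyRange 0 N 1)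

-- ===== PORT B =====
-- [base[r] for r in res]; every r is in range, so pyGetD is exact
def pvCompose (base res : List Int) : List Int :=
  res.map (fun r => PySem.List.pyGetD base r 0)

-- the 'while k > 0' squaring loop of Source B
def pvPowLoop (res base : List Int) (k : Int) : List Int :=
  if _h : k > 0 then
    pvPowLoop (if PySem.Int.mod k 2 = 1 then pvCompose base res else res)
      (pvCompose base base) (PySem.Int.floordiv k 2)
  else res
termination_by k.toNat
decreasing_by
  rw [PySem.Int.floordiv_eq_ediv_of_pos (by omega : (0:Int) < 2)]; omega

def gen_sequence_alt (e : Int) (N : Int) : List Int :=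
  let n : Int := if N > 0 then N else 0
  let h : Int := PySem.Int.floordiv n 2
  let p : List Int :=
    if PySem.Int.mod n 2 = 0 then
      (PySem.List.pyRange 0 n 1).map (fun j =>
        if PySem.Int.mod j 2 = 0 then PySem.Int.floordiv j 2 else h + PySem.Int.floordiv j 2)
    else
      (PySem.List.pyRange 0 (n - 1) 1).map (fun j =>
        if PySem.Int.mod j 2 = 0 then PySem.Int.floordiv j 2 else h + 1 + PySem.Int.floordiv j 2)
      ++ [h]
  pvPowLoop (PySem.List.pyRange 0 n 1) p e

-- ===== PRECONDITION & SPEC =====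
def Spec_gen_sequence (e : Int) (N : Int) (out : List Int) : Prop := out = gen_sequence_alt e N
instance (e : Int) (N : Int) (out : List Int) : Decidable (Spec_gen_sequence e N out) := by unfold Spec_gen_sequence; infer_instance

-- ===== CLAIM (what is proved, stated in full; the proofs are below) =====
def Claim_equal_gen_sequence : Prop := ∀ (e : Int) (N : Int), Dom_gen_sequence e N → Spec_gen_sequence e N (gen_sequence e N)

-- ===== LEMMAS AND PROOFS =====

-- the one-step interleave position map: new[j] = old[pim n j] on a length-n list
def pim (n j : ℕ) : ℕ := if j % 2 = 0 then j / 2 else n / 2 + n % 2 + j / 2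

-- lists of the shape "range n viewed through a position map"
def mrange (n : ℕ) (f : ℕ → ℕ) : List Int := (List.range n).map (fun j => ((f j : ℕ) : Int))

lemma pim_lt {n j : ℕ} (h : j < n) : pim n j < n := by
  unfold pim; split <;> omega

lemma modc (m : ℕ) : PySem.Int.mod (m : Int) 2 = ((m % 2 : ℕ) : Int) := by
  exact_mod_cast PySem.Int.mod_natCast m 2

lemma divc (m : ℕ) : PySem.Int.floordiv (m : Int) 2 = ((m / 2 : ℕ) : Int) := by
  exact_mod_cast PySem.Int.floordiv_natCast m 2

lemma len_mrange (n : ℕ) (f : ℕ → ℕ) : (mrange n f).length = n := by simp [mrange]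

lemma mrange_add (a b : ℕ) (f : ℕ → ℕ) :
    mrange (a + b) f = mrange a f ++ (List.range b).map (fun j => ((f (a + j) : ℕ) : Int)) := by
  unfold mrange
  rw [List.range_add, List.map_append, List.map_map]
  rfl

lemma mrange_take (n m : ℕ) (f : ℕ → ℕ) (hm : m ≤ n) : (mrange n f).take m = mrange m f := by
  unfold mrange
  rw [← List.map_take, List.take_range, Nat.min_eq_left hm]

lemma mrange_drop (n m : ℕ) (f : ℕ → ℕ) (hm : m ≤ n) :
    (mrange n f).drop m = (List.range (n - m)).map (fun j => ((f (m + j) : ℕ) : Int)) := by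
  obtain ⟨b, rfl⟩ : ∃ b, n = m + b := ⟨n - m, by omega⟩
  rw [mrange_add, List.drop_left' (by simp [len_mrange]), show m + b - m = b by omega]

lemma mrange_getD (n k : ℕ) (f : ℕ → ℕ) (hk : k < n) :
    PySem.List.pyGetD (mrange n f) (k : Int) 0 = ((f k : ℕ) : Int) := by
  rw [PySem.List.pyGetD_natCast]
  simp [mrange, List.getD, hk]

lemma zip_flat (F G : ℕ → Int) (h : ℕ) :
    (((List.range h).map F).zip ((List.range h).map G)).flatMap (fun t => [t.1, t.2])
      = (List.range (2 * h)).map (fun j => if j % 2 = 0 then F (j / 2) else G (j / 2)) := by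
  induction h with
  | zero => simp
  | succ h ih =>
    have e1 : 2 * (h + 1) = (2 * h + 1) + 1 := by omega
    rw [List.range_succ, List.map_append, List.map_append,
        List.zip_append (by simp), List.flatMap_append, ih,
        e1, List.range_succ, List.map_append, List.range_succ, List.map_append]
    have m1 : (2 * h) % 2 = 0 := by omega
    have m2 : (2 * h) / 2 = h := by omega
    have m3 : (2 * h + 1) % 2 = 1 := by omega
    have m4 : (2 * h + 1) / 2 = h := by omega
    simp [m1, m2, m3, m4]

lemma interleave_mrange (n : ℕ) (f : ℕ → ℕ) :
    pvInterleave (mrange n f) = mrange n (fun j => f (pim n j)) := by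
  unfold pvInterleave
  rw [len_mrange]
  rcases Nat.even_or_odd n with ⟨h, hn⟩ | ⟨h, hn⟩
  · -- n = h + h
    subst hn
    have hmod : PySem.Int.mod ((h + h : ℕ) : Int) 2 = 0 := by
      rw [modc, show (h + h) % 2 = 0 by omega]; simp
    have hdiv : PySem.Int.floordiv ((h + h : ℕ) : Int) 2 = ((h : ℕ) : Int) := by
      rw [divc, show (h + h) / 2 = h by omega]
    rw [if_pos hmod, hdiv, PySem.List.slice_to_natCast, PySem.List.slice_from_natCast,
        mrange_take _ _ _ (by omega), mrange_drop _ _ _ (by omega),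
        show h + h - h = h by omega]
    unfold mrange
    rw [zip_flat, show 2 * h = h + h by omega]
    apply List.map_congr_left
    intro j hj
    have hj' : j < h + h := List.mem_range.mp hj
    simp only [pim]
    split_ifs with hp
    · rfl
    · rw [Nat.cast_inj]
      congr 1
      omega
  · -- n = 2 * h + 1
    subst hn
    have hmod : PySem.Int.mod ((2 * h + 1 : ℕ) : Int) 2 = 1 := by
      rw [modc, show (2 * h + 1) % 2 = 1 by omega]; simp
    have hdiv : PySem.Int.floordiv ((2 * h + 1 : ℕ) : Int) 2 = ((h : ℕ) : Int) := by
      rw [divc, show (2 * h + 1) / 2 = h by omega]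
    rw [if_neg (by rw [hmod]; norm_num), hdiv]
    have hc : ((h : ℕ) : Int) + 1 = (((h + 1 : ℕ)) : Int) := by push_cast; ring
    rw [hc, PySem.List.slice_to_natCast, PySem.List.slice_from_natCast,
        mrange_take _ _ _ (by omega), mrange_drop _ _ _ (by omega),
        mrange_getD _ _ _ (by omega),
        show 2 * h + 1 - (h + 1) = h by omega]
    unfold mrange
    rw [zip_flat, List.range_add, List.map_append]
    congr 1
    · apply List.map_congr_left
      intro j hj
      have hj' : j < 2 * h := List.mem_range.mp hj
      simp only [pim]
      split_ifs with hp
      · rfl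
      · rw [Nat.cast_inj]
        congr 1
        omega
    · simp only [List.range_one, List.map_cons, List.map_nil, pim, Nat.add_zero]
      rw [if_pos (by omega), show 2 * h / 2 = h by omega]
lemma iterate_interleave (n : ℕ) (m : ℕ) :
    pvInterleave^[m] (mrange n id) = mrange n (fun j => (pim n)^[m] j) := by
  induction m with
  | zero => simp [mrange]
  | succ m ih =>
    rw [Function.iterate_succ_apply', ih, interleave_mrange]
    unfold mrange
    apply List.map_congr_left
    intro j hj
    simp only [Function.iterate_succ_apply]

lemma compose_mrange (n : ℕ) (a b : ℕ → ℕ) (ha : ∀ j < n, a j < n) :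
    pvCompose (mrange n b) (mrange n a) = mrange n (fun j => b (a j)) := by
  simp only [pvCompose, mrange, List.map_map]
  apply List.map_congr_left
  intro j hj
  have hj' : j < n := List.mem_range.mp hj
  have hlt : a j < n := ha j hj'
  simp only [Function.comp_apply, PySem.List.pyGetD_natCast]
  simp [List.getD, hlt]
lemma iterate_double (b : ℕ → ℕ) (p : ℕ) (x : ℕ) :
    (fun x => b (b x))^[p] x = b^[2 * p] x := by
  induction p generalizing x with
  | zero => simp
  | succ p ih =>
    rw [Function.iterate_succ_apply, ih]
    have e : 2 * (p + 1) = 2 * p + 1 + 1 := by omega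
    rw [e, Function.iterate_succ_apply, Function.iterate_succ_apply]

lemma powLoop_mrange (n : ℕ) (k : Int) (a b : ℕ → ℕ)
    (ha : ∀ j < n, a j < n) (hb : ∀ j < n, b j < n) :
    pvPowLoop (mrange n a) (mrange n b) k = mrange n (fun j => b^[k.toNat] (a j)) := by
  suffices H : ∀ (m : ℕ) (k : Int), k.toNat = m → ∀ (a b : ℕ → ℕ),
      (∀ j < n, a j < n) → (∀ j < n, b j < n) →
      pvPowLoop (mrange n a) (mrange n b) k = mrange n (fun j => b^[m] (a j)) from
    H k.toNat k rfl a b ha hb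
  intro m
  induction m using Nat.strong_induction_on with
  | _ m IH =>
    intro k hk a b ha hb
    rw [pvPowLoop]
    by_cases hpos : k > 0
    · rw [dif_pos hpos]
      have hdiv : PySem.Int.floordiv k 2 = k / 2 :=
        PySem.Int.floordiv_eq_ediv_of_pos (by omega)
      have hmod : PySem.Int.mod k 2 = k % 2 :=
        PySem.Int.mod_eq_emod_of_pos (by omega)
      have hlt : (k / 2).toNat < m := by omega
      have hba : ∀ j < n, b (a j) < n := fun j hj => hb _ (ha j hj)
      have hbb : ∀ j < n, b (b j) < n := fun j hj => hb _ (hb j hj)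
      rw [hdiv, hmod]
      by_cases hodd : k % 2 = 1
      · rw [if_pos hodd, compose_mrange n a b ha, compose_mrange n b b hb,
            IH (k / 2).toNat hlt (k / 2) rfl _ _ hba hbb]
        congr 1
        funext j
        rw [iterate_double]
        have em : m = 2 * (k / 2).toNat + 1 := by omega
        rw [em, Function.iterate_succ_apply]
      · rw [if_neg hodd, compose_mrange n b b hb,
            IH (k / 2).toNat hlt (k / 2) rfl _ _ ha hbb]
        congr 1
        funext j
        rw [iterate_double]
        have em : m = 2 * (k / 2).toNat := by omega
        rw [em]
    · rw [dif_neg hpos]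
      have hm : m = 0 := by omega
      subst hm
      simp

lemma pyRange_id (M : Int) : PySem.List.pyRange 0 M 1 = mrange M.toNat id := by
  rw [PySem.List.pyRange_one]
  simp [mrange]

lemma A_eq (e N : Int) :
    gen_sequence e N = mrange N.toNat (fun j => (pim N.toNat)^[e.toNat] j) := by
  unfold gen_sequence
  have fl : ∀ (l : List Int) (init : List Int),
      l.foldl (fun s _ => pvInterleave s) init = pvInterleave^[l.length] init := by
    intro l
    induction l with
    | nil => intro init; simp
    | cons x t ih =>
      intro init
      simp only [List.foldl_cons, List.length_cons, ih, Function.iterate_succ_apply]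
  rw [fl, PySem.List.length_pyRange_one, pyRange_id]
  have he : (e - 0).toNat = e.toNat := by omega
  rw [he, iterate_interleave]

lemma B_eq (e N : Int) :
    gen_sequence_alt e N = mrange N.toNat (fun j => (pim N.toNat)^[e.toNat] j) := by
  have hn : (if N > 0 then N else (0 : Int)) = (N.toNat : Int) := by
    split <;> omega
  simp only [gen_sequence_alt, hn]
  have hinit : mrange N.toNat id = PySem.List.pyRange 0 (N.toNat : Int) 1 :=
    (pyRange_id (N.toNat : Int)).symm.trans (by simp)
  set nn := N.toNat with hnn
  have hp : (if PySem.Int.mod (nn : Int) 2 = 0 then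
      (PySem.List.pyRange 0 (nn : Int) 1).map (fun j =>
        if PySem.Int.mod j 2 = 0 then PySem.Int.floordiv j 2
        else PySem.Int.floordiv (nn : Int) 2 + PySem.Int.floordiv j 2)
    else
      (PySem.List.pyRange 0 ((nn : Int) - 1) 1).map (fun j =>
        if PySem.Int.mod j 2 = 0 then PySem.Int.floordiv j 2
        else PySem.Int.floordiv (nn : Int) 2 + 1 + PySem.Int.floordiv j 2)
      ++ [PySem.Int.floordiv (nn : Int) 2]) = mrange nn (pim nn) := by
    by_cases hpar : nn % 2 = 0
    · rw [if_pos (by rw [modc, hpar]; simp)]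
      rw [pyRange_id, mrange]
      simp only [Int.toNat_natCast, List.map_map]
      rw [mrange]
      apply List.map_congr_left
      intro j hj
      have hj' : j < nn := List.mem_range.mp hj
      simp only [Function.comp_apply, id_eq, modc, divc, pim, Nat.cast_eq_zero]
      split_ifs with hp2 <;> push_cast <;> omega
    · rw [if_neg (by rw [modc]; simp only [Nat.cast_eq_zero]; omega)]
      have h1 : ((nn : Int) - 1) = ((nn - 1 : ℕ) : Int) := by omega
      rw [h1, pyRange_id, mrange]
      simp only [Int.toNat_natCast, List.map_map]
      rw [mrange]
      have hsplit : List.range nn = List.range (nn - 1) ++ [nn - 1] := by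
        conv_lhs => rw [show nn = (nn - 1) + 1 by omega]
        exact List.range_succ
      rw [hsplit, List.map_append]
      congr 1
      · apply List.map_congr_left
        intro j hj
        have hj' : j < nn - 1 := List.mem_range.mp hj
        simp only [Function.comp_apply, id_eq, modc, divc, pim, Nat.cast_eq_zero]
        split_ifs with hp2 <;> push_cast <;> omega
      · simp only [List.map_cons, List.map_nil, divc, pim]
        rw [if_pos (by omega), show (nn - 1) / 2 = nn / 2 by omega]
  rw [hp, ← hinit]
  rw [powLoop_mrange nn e id (pim nn) (fun j hj => hj) (fun j hj => pim_lt hj)]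
  simp only [id_eq]

-- ===== VERDICT (by name: the statement is the Claim_ definition above) =====
theorem gen_sequence_spec : Claim_equal_gen_sequence := by
  intro e N _
  unfold Spec_gen_sequence
  rw [A_eq, B_eq]
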